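-- pv_equiv track=rewrite | github.com/wrjang96/Programmers_code | ProL2 - 더 맵게.py | solution
-- ===== SOURCE A (Python) =====
-- import heapq
--
-- def solution(scoville, K):
--     answer = 0
--     heap = []
--     for num in scoville:
--         heapq.heappush(heap, num)
--     while heap[0] < K:
--         if len(heap) < 2:
--             answer = - 1
--             break
--         heapq.heappush(heap, heapq.heappop(heap) + (heapq.heappop(heap) * 2))
--         answer +=1
--     return answer
-- ===== SOURCE B (Python) =====
-- def _insert_sorted(lst, x):
--     # insert x into the ascending list lst, after any equal elements
--     i = 0
--     while i < len(lst) and lst[i] <= x: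
--         i += 1
--     lst.insert(i, x)
--
--
-- def solution(scoville, K):
--     lst = sorted(scoville)
--     answer = 0
--     while lst[0] < K:
--         if len(lst) < 2:
--             return -1
--         a = lst.pop(0)
--         b = lst.pop(0)
--         _insert_sorted(lst, a + 2 * b)
--         answer += 1
--     return answer
-- ===== Notes on version B (the rewrite author's own statement) =====
-- stated objective: alternative
-- what changed: Replaces the binary min-heap (heapq sift operations) with an explicitly sorted list: sort once, pop the two front elements, and reinsert the mix at its ordered position.
import Mathlib
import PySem

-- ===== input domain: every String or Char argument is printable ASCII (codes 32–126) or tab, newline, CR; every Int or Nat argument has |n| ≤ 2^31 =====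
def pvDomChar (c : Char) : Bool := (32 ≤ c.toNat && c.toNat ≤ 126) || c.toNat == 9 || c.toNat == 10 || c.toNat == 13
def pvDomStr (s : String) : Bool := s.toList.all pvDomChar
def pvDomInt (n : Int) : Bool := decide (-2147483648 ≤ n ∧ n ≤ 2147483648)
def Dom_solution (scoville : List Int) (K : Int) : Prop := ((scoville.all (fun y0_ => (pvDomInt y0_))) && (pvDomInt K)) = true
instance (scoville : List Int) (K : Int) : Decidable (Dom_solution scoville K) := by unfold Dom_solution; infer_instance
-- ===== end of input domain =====

-- B replaces the heapq binary min-heap with an explicitly sorted list (sort once,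
-- pop the two front elements, reinsert the mix at its ordered position); alternative
-- data structure, same return value.

-- ===== PORT A =====
-- heapq.heappush / heappop are library calls; they are ported as a min-heap
-- (skew heap) with heapq's observable semantics: push inserts an element,
-- pop removes and returns the minimum, heap[0] reads the minimum.
-- The Nat fuel arguments are totality guards only: they are always called with
-- fuel ≥ the structure's size, so the 0-fuel branch is never reached.
inductive Heap where
  | nil : Heap
  | node : Int → Heap → Heap → Heap
deriving DecidableEq, Repr

def Heap.size : Heap → Nat
  | .nil => 0
  | .node _ l r => l.size + r.size + 1

def Heap.mergeF : Nat → Heap → Heap → Heap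
  | 0, _, _ => .nil                       -- unreachable: fuel ≥ combined size
  | _ + 1, .nil, h => h
  | _ + 1, .node a l r, .nil => .node a l r
  | fuel + 1, .node a l1 r1, .node b l2 r2 =>
    if a ≤ b then .node a (Heap.mergeF fuel r1 (.node b l2 r2)) l1
    else .node b (Heap.mergeF fuel (.node a l1 r1) r2) l2

def Heap.merge (h1 h2 : Heap) : Heap := Heap.mergeF (h1.size + h2.size) h1 h2

def Heap.push (h : Heap) (x : Int) : Heap := Heap.merge h (.node x .nil .nil)

-- the while loop of A: heap[0] < K test, len check, pop-pop-push
def loopA (K : Int) : Nat → Heap → Int → Int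
  | 0, _, ans => ans                      -- unreachable: fuel ≥ heap size bounds the iterations
  | _ + 1, .nil, ans => ans               -- heap[0] raises IndexError in Python; unreachable under Pre_
  | fuel + 1, .node a l r, ans =>
    if a < K then
      if (Heap.node a l r).size < 2 then -1
      else
        match Heap.merge l r with
        | .nil => ans                     -- unreachable: a second element exists
        | .node b l2 r2 => loopA K fuel (Heap.push (Heap.merge l2 r2) (a + b * 2)) (ans + 1)
    else ans

def solution (scoville : List Int) (K : Int) : Int :=
  let heap := scoville.foldl (fun heap num => Heap.push heap num) Heap.nil
  loopA K heap.size heap 0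

-- ===== PORT B =====
-- _insert_sorted: linear scan past all elements ≤ x, then insert
def insortB (x : Int) : List Int → List Int
  | [] => [x]
  | y :: ys => if y ≤ x then y :: insortB x ys else x :: y :: ys

-- the while loop of B over the sorted list (fuel = list length, a totality guard)
def loopB (K : Int) : Nat → List Int → Int → Int
  | 0, _, ans => ans                      -- unreachable: fuel ≥ length bounds the iterations
  | _ + 1, [], ans => ans                 -- lst[0] raises IndexError in Python; unreachable under Pre_
  | fuel + 1, a :: rest, ans =>
    if a < K then
      match rest with
      | [] => -1
      | b :: rest2 => loopB K fuel (insortB (a + 2 * b) rest2) (ans + 1)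
    else ans

def solution_alt (scoville : List Int) (K : Int) : Int :=
  let lst := PySem.List.sorted scoville (fun x => x) false
  loopB K lst.length lst 0

-- ===== PRECONDITION & SPEC =====
-- Pre_ excludes only the empty list, on which both Pythons raise IndexError (heap[0] / lst[0]).
def Pre_solution (scoville : List Int) (K : Int) : Prop := scoville ≠ []
instance (scoville : List Int) (K : Int) : Decidable (Pre_solution scoville K) := by
  unfold Pre_solution; infer_instance

def pvWitness_solution : List Int × Int := ([1, 2, 9], 7)

def Spec_solution (scoville : List Int) (K : Int) (out : Int) : Prop := out = solution_alt scoville K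
instance (scoville : List Int) (K : Int) (out : Int) : Decidable (Spec_solution scoville K out) := by
  unfold Spec_solution; infer_instance

-- ===== CLAIM (what is proved, stated in full; the proofs are below) =====
def Claim_equal_solution : Prop := ∀ (scoville : List Int) (K : Int), Dom_solution scoville K → Pre_solution scoville K → Spec_solution scoville K (solution scoville K)

-- ===== LEMMAS AND PROOFS =====

def Heap.toList : Heap → List Int
  | .nil => []
  | .node a l r => a :: (l.toList ++ r.toList)

def Heap.HP : Heap → Prop
  | .nil => True
  | .node a l r => (∀ x ∈ l.toList, a ≤ x) ∧ (∀ x ∈ r.toList, a ≤ x) ∧ l.HP ∧ r.HP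

theorem Heap.size_eq_zero {h : Heap} (hz : h.size = 0) : h = Heap.nil := by
  cases h with
  | nil => rfl
  | node a l r => simp [Heap.size] at hz

theorem Heap.toList_mergeF_perm : ∀ (fuel : Nat) (h1 h2 : Heap), h1.size + h2.size ≤ fuel →
    (Heap.mergeF fuel h1 h2).toList.Perm (h1.toList ++ h2.toList) := by
  intro fuel
  induction fuel with
  | zero =>
    intro h1 h2 hf
    have e1 : h1 = Heap.nil := Heap.size_eq_zero (by omega)
    have e2 : h2 = Heap.nil := Heap.size_eq_zero (by omega)
    subst e1; subst e2
    simp [Heap.mergeF, Heap.toList]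
  | succ fuel ih =>
    intro h1 h2 hf
    match h1, h2 with
    | .nil, h2 => simp [Heap.mergeF, Heap.toList]
    | .node a l r, .nil => simp [Heap.mergeF, Heap.toList]
    | .node a l1 r1, .node b l2 r2 =>
      rw [Heap.mergeF]
      by_cases hab : a ≤ b
      · rw [if_pos hab]
        refine List.perm_iff_count.2 (fun x => ?_)
        have := (ih r1 (.node b l2 r2) (by simp [Heap.size] at hf ⊢; omega)).count_eq x
        simp [Heap.toList, List.count_append, List.count_cons] at this ⊢
        omega
      · rw [if_neg hab]
        refine List.perm_iff_count.2 (fun x => ?_)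
        have := (ih (.node a l1 r1) r2 (by simp [Heap.size] at hf ⊢; omega)).count_eq x
        simp [Heap.toList, List.count_append, List.count_cons] at this ⊢
        omega

theorem Heap.toList_merge_perm (h1 h2 : Heap) :
    (Heap.merge h1 h2).toList.Perm (h1.toList ++ h2.toList) :=
  Heap.toList_mergeF_perm _ h1 h2 (le_refl _)

theorem Heap.HP_mergeF : ∀ (fuel : Nat) (h1 h2 : Heap), h1.size + h2.size ≤ fuel →
    h1.HP → h2.HP → (Heap.mergeF fuel h1 h2).HP := by
  intro fuel
  induction fuel with
  | zero => intro h1 h2 hf H1 H2; simp [Heap.mergeF, Heap.HP]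
  | succ fuel ih =>
    intro h1 h2 hf H1 H2
    match h1, h2 with
    | .nil, h2 => simpa [Heap.mergeF]
    | .node a l r, .nil => simpa [Heap.mergeF]
    | .node a l1 r1, .node b l2 r2 =>
      rw [Heap.mergeF]
      have hf1 : r1.size + (Heap.node b l2 r2).size ≤ fuel := by
        simp [Heap.size] at hf ⊢; omega
      have hf2 : (Heap.node a l1 r1).size + r2.size ≤ fuel := by
        simp [Heap.size] at hf ⊢; omega
      by_cases hab : a ≤ b
      · rw [if_pos hab]
        obtain ⟨hl1, hr1, Hl1, Hr1⟩ := H1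
        refine ⟨fun x hx => ?_, hl1, ih r1 (.node b l2 r2) hf1 Hr1 H2, Hl1⟩
        obtain ⟨hl2, hr2, _, _⟩ := H2
        have hmem := (Heap.toList_mergeF_perm fuel r1 (.node b l2 r2) hf1).mem_iff.1 hx
        simp [Heap.toList] at hmem
        rcases hmem with h | rfl | h | h
        · exact hr1 x h
        · exact hab
        · exact le_trans hab (hl2 x h)
        · exact le_trans hab (hr2 x h)
      · rw [if_neg hab]
        obtain ⟨hl2, hr2, Hl2, Hr2⟩ := H2
        have hba : b ≤ a := (not_le.mp hab).le
        refine ⟨fun x hx => ?_, hl2, ih (.node a l1 r1) r2 hf2 H1 Hr2, Hl2⟩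
        obtain ⟨hl1, hr1, _, _⟩ := H1
        have hmem := (Heap.toList_mergeF_perm fuel (.node a l1 r1) r2 hf2).mem_iff.1 hx
        simp [Heap.toList] at hmem
        rcases hmem with rfl | h | h | h
        · exact hba
        · exact le_trans hba (hl1 x h)
        · exact le_trans hba (hr1 x h)
        · exact hr2 x h

theorem Heap.HP_merge (h1 h2 : Heap) (H1 : h1.HP) (H2 : h2.HP) : (Heap.merge h1 h2).HP :=
  Heap.HP_mergeF _ h1 h2 (le_refl _) H1 H2

theorem Heap.length_toList (h : Heap) : h.toList.length = h.size := by
  induction h with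
  | nil => simp [Heap.toList, Heap.size]
  | node a l r ihl ihr =>
    simp only [Heap.toList, Heap.size, List.length_cons, List.length_append, ihl, ihr]

theorem Heap.HP_push (h : Heap) (x : Int) (H : h.HP) : (Heap.push h x).HP :=
  Heap.HP_merge h (.node x .nil .nil) H (by simp [Heap.HP, Heap.toList])

theorem Heap.toList_push_perm (h : Heap) (x : Int) :
    (Heap.push h x).toList.Perm (x :: h.toList) := by
  refine List.perm_iff_count.2 (fun y => ?_)
  have := (Heap.toList_merge_perm h (.node x .nil .nil)).count_eq y
  simp [Heap.push, Heap.toList, List.count_append, List.count_cons] at this ⊢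
  omega

-- head of a nonempty heap equals head of any sorted permutation of its contents
theorem heap_head_eq (a : Int) (l r : Heap) (m : Int) (rest : List Int)
    (H : (Heap.node a l r).HP)
    (hp : (Heap.node a l r).toList.Perm (m :: rest))
    (hs : (m :: rest).Pairwise (· ≤ ·)) : a = m := by
  obtain ⟨hl, hr, _, _⟩ := H
  have ham : m ≤ a := by
    have : a ∈ m :: rest := hp.mem_iff.1 (by simp [Heap.toList])
    rcases List.mem_cons.1 this with rfl | h
    · exact le_refl _
    · exact (List.pairwise_cons.1 hs).1 a h
  have hma : a ≤ m := by
    have : m ∈ (Heap.node a l r).toList := hp.mem_iff.2 (by simp)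
    simp [Heap.toList] at this
    rcases this with rfl | h | h
    · exact le_refl _
    · exact hl m h
    · exact hr m h
  exact le_antisymm hma ham

theorem insortB_perm (x : Int) (l : List Int) : (insortB x l).Perm (x :: l) := by
  induction l with
  | nil => simp [insortB]
  | cons y ys ih =>
    by_cases h : y ≤ x
    · simp only [insortB, if_pos h]
      exact (ih.cons y).trans (List.Perm.swap x y ys)
    · simp [insortB, h]

theorem insortB_pairwise (x : Int) (l : List Int) (hs : l.Pairwise (· ≤ ·)) :
    (insortB x l).Pairwise (· ≤ ·) := by
  induction l with
  | nil => simp [insortB]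
  | cons y ys ih =>
    obtain ⟨hy, hys⟩ := List.pairwise_cons.1 hs
    by_cases h : y ≤ x
    · simp only [insortB, if_pos h]
      refine List.pairwise_cons.2 ⟨fun z hz => ?_, ih hys⟩
      rcases List.mem_cons.1 ((insortB_perm x ys).mem_iff.1 hz) with rfl | hz
      · exact h
      · exact hy z hz
    · simp only [insortB, if_neg h]
      refine List.pairwise_cons.2 ⟨fun z hz => ?_, hs⟩
      rcases List.mem_cons.1 hz with rfl | hz
      · exact (not_le.mp h).le
      · exact le_trans (not_le.mp h).le (hy z hz)

theorem loop_eq (K : Int) : ∀ (fuel : Nat) (h : Heap) (l : List Int) (ans : Int),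
    h.HP → l.Pairwise (· ≤ ·) → h.toList.Perm l →
    loopA K fuel h ans = loopB K fuel l ans := by
  intro fuel
  induction fuel with
  | zero => intro h l ans _ _ _; simp only [loopA, loopB]
  | succ fuel ih =>
    intro h l ans HP hsorted hperm
    match l with
    | [] =>
      have hnil : h = Heap.nil := by
        cases h with
        | nil => rfl
        | node a hl hr =>
          have := hperm.eq_nil
          simp [Heap.toList] at this
      subst hnil
      simp only [loopA, loopB]
    | m :: rest =>
      match h with
      | .nil =>
        have := hperm.length_eq
        simp [Heap.toList] at this
      | .node a hl hr =>
        have ha : a = m := heap_head_eq a hl hr m rest HP hperm hsorted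
        subst ha
        simp only [loopA, loopB]
        by_cases hK : a < K
        · rw [if_pos hK, if_pos hK]
          have hsz : (Heap.node a hl hr).size = rest.length + 1 := by
            have := hperm.length_eq
            rw [Heap.length_toList] at this
            simpa using this
          match rest with
          | [] =>
            rw [if_pos (by simp only [List.length_nil] at hsz; omega)]
          | b :: rest2 =>
            rw [if_neg (by simp only [List.length_cons] at hsz; omega)]
            -- the remaining heap after the first pop
            have hperm1 : (Heap.merge hl hr).toList.Perm (b :: rest2) := by
              have h1 := Heap.toList_merge_perm hl hr
              have h2 : (a :: (hl.toList ++ hr.toList)).Perm (a :: (b :: rest2)) := hperm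
              exact h1.trans h2.cons_inv
            have HP1 : (Heap.merge hl hr).HP := Heap.HP_merge hl hr HP.2.2.1 HP.2.2.2
            match hm : Heap.merge hl hr with
            | .nil =>
              rw [hm] at hperm1
              have := hperm1.symm.eq_nil
              simp at this
            | .node c l2 r2 =>
              rw [hm] at hperm1 HP1
              have hc : c = b :=
                heap_head_eq c l2 r2 b rest2 HP1 hperm1 (List.pairwise_cons.1 hsorted).2
              subst hc
              have hperm2 : (l2.toList ++ r2.toList).Perm rest2 := by
                have : (c :: (l2.toList ++ r2.toList)).Perm (c :: rest2) := hperm1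
                exact this.cons_inv
              have hrs2 : rest2.Pairwise (· ≤ ·) :=
                ((List.pairwise_cons.1 hsorted).2.sublist (List.sublist_cons_self _ _))
              show loopA K fuel ((l2.merge r2).push (a + c * 2)) (ans + 1)
                = loopB K fuel (insortB (a + 2 * c) rest2) (ans + 1)
              rw [show a + c * 2 = a + 2 * c from by ring]
              refine ih (Heap.push (Heap.merge l2 r2) (a + 2 * c)) (insortB (a + 2 * c) rest2)
                (ans + 1) (Heap.HP_push _ _ (Heap.HP_merge l2 r2 HP1.2.2.1 HP1.2.2.2))
                (insortB_pairwise _ _ hrs2) ?_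
              refine List.perm_iff_count.2 (fun y => ?_)
              have e1 := (Heap.toList_push_perm (Heap.merge l2 r2) (a + 2 * c)).count_eq y
              have e2 := (Heap.toList_merge_perm l2 r2).count_eq y
              have e3 := hperm2.count_eq y
              have e4 := (insortB_perm (a + 2 * c) rest2).count_eq y
              simp [List.count_append, List.count_cons] at e1 e2 e3 e4 ⊢
              omega
        · rw [if_neg hK, if_neg hK]

theorem foldl_push_perm (xs : List Int) : ∀ (h : Heap),
    (xs.foldl (fun heap num => Heap.push heap num) h).toList.Perm (h.toList ++ xs) := by
  induction xs with
  | nil => simp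
  | cons x xs ih =>
    intro h
    refine List.perm_iff_count.2 (fun y => ?_)
    have e1 := (ih (Heap.push h x)).count_eq y
    have e2 := (Heap.toList_push_perm h x).count_eq y
    simp [List.foldl, List.count_append, List.count_cons] at e1 e2 ⊢
    omega

theorem foldl_push_HP (xs : List Int) : ∀ (h : Heap), h.HP →
    (xs.foldl (fun heap num => Heap.push heap num) h).HP := by
  induction xs with
  | nil => intro h H; simpa
  | cons x xs ih => intro h H; exact ih _ (Heap.HP_push h x H)

-- ===== VERDICT (by name: the statement is the Claim_ definition above) =====
theorem solution_spec : Claim_equal_solution := by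
  intro scoville K _ _
  unfold Spec_solution solution solution_alt
  simp only []
  have hperm : (scoville.foldl (fun heap num => Heap.push heap num) Heap.nil).toList.Perm
      (PySem.List.sorted scoville (fun x => x) false) := by
    have h1 := foldl_push_perm scoville Heap.nil
    simp [Heap.toList] at h1
    exact h1.trans (PySem.List.sorted_perm scoville (fun x => x) false).symm
  have hfuel : (scoville.foldl (fun heap num => Heap.push heap num) Heap.nil).size
      = (PySem.List.sorted scoville (fun x => x) false).length := by
    rw [← Heap.length_toList]
    exact hperm.length_eq
  rw [hfuel]
  exact loop_eq K _ _ _ 0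
    (foldl_push_HP scoville Heap.nil (by simp [Heap.HP]))
    (by simpa using PySem.List.sorted_pairwise scoville (fun x => x)) hperm
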